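-- pv_equiv track=rewrite | github.com/aswinavofficial/Google-Foobar-Challenges | cake_is_not_a_lie.py | solution
-- ===== SOURCE A (Python) =====
-- def solution(s):
--     max_possible_equal_size_piece = 1
--     length_of_cake = len(s)
--
--     for size_of_cake_piece in range(1, length_of_cake):
--         cake_pieces = []
--         if(length_of_cake % size_of_cake_piece == 0):
--             for cake_piece in range(0, length_of_cake, size_of_cake_piece):
--                 cake_pieces.append(s[cake_piece:cake_piece+size_of_cake_piece])
--             number_of_cake_pieces_divided = len(cake_pieces)
--
--             max_possible_equal_size_piece = check(number_of_cake_pieces_divided, cake_pieces)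
--             if(max_possible_equal_size_piece != 1):
--                 return max_possible_equal_size_piece
--     return max_possible_equal_size_piece
--
-- def check(number_of_cake_pieces_divided, cake_pieces):
--     if cake_pieces.count(cake_pieces[0]) == number_of_cake_pieces_divided :
--         return number_of_cake_pieces_divided
--     else:
--         return 1
-- ===== SOURCE B (Python) =====
-- def solution(s):
--     if not s:
--         return 1
--     return len(s) // (s + s).index(s, 1)
-- ===== Notes on version B (the rewrite author's own statement) =====
-- stated objective: faster
-- what changed: A tests every candidate piece size by cutting the string into chunks and comparing them all; B uses the classic rotation trick: the smallest p >= 1 with (s+s).index(s,1) == p is the smallest cyclic period of s, which always divides len(s), so the answer is len(s) // p via one substring search.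
import Mathlib
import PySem

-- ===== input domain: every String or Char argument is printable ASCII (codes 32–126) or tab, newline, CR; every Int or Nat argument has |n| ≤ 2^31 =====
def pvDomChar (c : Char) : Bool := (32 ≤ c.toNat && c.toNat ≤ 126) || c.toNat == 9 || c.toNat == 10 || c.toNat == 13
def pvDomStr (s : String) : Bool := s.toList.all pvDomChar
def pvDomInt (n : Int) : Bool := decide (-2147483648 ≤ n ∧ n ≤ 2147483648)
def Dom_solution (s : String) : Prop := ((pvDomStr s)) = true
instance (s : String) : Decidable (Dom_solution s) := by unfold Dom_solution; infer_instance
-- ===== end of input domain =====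

-- B replaces A's divisor-by-divisor chunk comparison with the classic rotation trick:
-- the smallest p ≥ 1 with (s+s)[p:p+n] == s is the smallest cyclic period of s, and it
-- divides n, so the answer is n // p.  Objective: faster (one substring search).

-- ===== PORT A =====
-- check(number_of_cake_pieces_divided, cake_pieces); cake_pieces[0] is total here:
-- at every call site cake_pieces is nonempty (the 'none' branch is unreachable).
def checkA (num : Int) (pieces : List (List Char)) : Int :=
  match PySem.List.pyGet? pieces 0 with
  | some p0 => if (PySem.List.count pieces p0 : Int) = num then num else 1
  | none => 1

-- the 'for size_of_cake_piece in range(1, length_of_cake)' loop with its early return;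
-- max_possible_equal_size_piece is 1 whenever the loop falls through, so the final
-- 'return max_possible_equal_size_piece' is the 'else 1' below.
def solutionLoop (l : List Char) (size : Nat) : Int :=
  if size < l.length then
    if l.length % size = 0 then
      let pieces := (PySem.List.pyRange 0 (l.length : Int) (size : Int)).foldl
        (fun acc c => acc ++ [PySem.List.slice l (some c) (some (c + (size : Int)))]) []
      let m := checkA (pieces.length : Int) pieces
      if m ≠ 1 then m else solutionLoop l (size + 1)
    else solutionLoop l (size + 1)
  else 1
termination_by l.length - size

def solution (s : String) : Int := solutionLoop s.toList 1

-- ===== PORT B =====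
-- Source B: if not s: return 1; return len(s) // (s + s).index(s, 1)
-- (.index: the match always exists, at n at the latest, so index = find = findFrom)
def solution_alt (s : String) : Int :=
  if s = "" then 1
  else PySem.Int.floordiv (PySem.Str.len s) (PySem.Str.findFrom (s ++ s) s 1)

-- ===== PRECONDITION & SPEC =====
def Spec_solution (s : String) (out : Int) : Prop := out = solution_alt s
instance (s : String) (out : Int) : Decidable (Spec_solution s out) := by unfold Spec_solution; infer_instance

-- ===== CLAIM (what is proved, stated in full; the proofs are below) =====
def Claim_equal_solution : Prop := ∀ (s : String), Dom_solution s → Spec_solution s (solution s)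

-- ===== LEMMAS AND PROOFS =====

-- 'l is fixed by the cyclic rotation that moves index i to index (i+p) mod n'
def RotFix (l : List Char) (p : Nat) : Prop :=
  ∀ i, i < l.length → l.getD i ' ' = l.getD ((i + p) % l.length) ' '

theorem rotFix_length (l : List Char) : RotFix l l.length := by
  intro i hi
  rw [Nat.add_mod_right, Nat.mod_eq_of_lt hi]

theorem rotFix_sub {l : List Char} {p q : Nat} (hp : RotFix l p) (hq : RotFix l q)
    (hpq : p ≤ q) : RotFix l (q - p) := by
  intro i hi
  have hn : 0 < l.length := by omega
  have hj : (i + (q - p)) % l.length < l.length := Nat.mod_lt _ hn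
  have h1 := hq i hi
  have h2 := hp _ hj
  rw [Nat.mod_add_mod, show i + (q - p) + p = i + q from by omega] at h2
  rw [h1, ← h2]

theorem rotFix_mod {l : List Char} {d : Nat} (hd : RotFix l d) (hdpos : 0 < d) :
    ∀ m, RotFix l m → RotFix l (m % d) := by
  intro m
  induction m using Nat.strong_induction_on with
  | _ m ih =>
    intro hm
    by_cases h : m < d
    · rwa [Nat.mod_eq_of_lt h]
    · rw [Nat.mod_eq_sub_mod (by omega)]
      exact ih (m - d) (by omega) (rotFix_sub hd hm (by omega))

theorem rot_getD {l : List Char} {p : Nat} (hp : p ≤ l.length) {j : Nat} (hj : j < l.length) :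
    (l.drop p ++ l.take p).getD j ' ' =
      (if j < l.length - p then l.getD (p + j) ' ' else l.getD (j + p - l.length) ' ') := by
  have hdl : (l.drop p).length = l.length - p := by simp
  have hlen : (l.drop p ++ l.take p).length = l.length := by simp; omega
  split
  next h =>
    rw [List.getD_eq_getElem _ _ (by omega), List.getD_eq_getElem _ _ (by omega),
      List.getElem_append_left (by omega), List.getElem_drop]
  next h =>
    rw [List.getD_eq_getElem _ _ (by omega), List.getD_eq_getElem _ _ (by omega),
      List.getElem_append_right (by omega)]
    simp only [List.getElem_take, hdl]
    congr 1
    omega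

theorem rot_eq_iff_rotFix {l : List Char} {p : Nat} (hp : p ≤ l.length) :
    (l.drop p ++ l.take p = l) ↔ RotFix l p := by
  constructor
  · intro h i hi
    have hh : (l.drop p ++ l.take p).getD i ' ' = l.getD i ' ' := by rw [h]
    rw [rot_getD hp hi] at hh
    by_cases hc : i < l.length - p
    · rw [if_pos hc] at hh
      rw [Nat.mod_eq_of_lt (by omega), ← hh, Nat.add_comm]
    · rw [if_neg hc] at hh
      rw [Nat.mod_eq_sub_mod (by omega), Nat.mod_eq_of_lt (by omega), ← hh]
  · intro hf
    apply List.ext_getElem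
    · simp; omega
    · intro j h1 h2
      have hgd : (l.drop p ++ l.take p).getD j ' ' = l.getD j ' ' := by
        rw [rot_getD hp h2]
        have h3 := hf j h2
        by_cases hc : j < l.length - p
        · rw [if_pos hc, Nat.add_comm p j]
          rw [Nat.mod_eq_of_lt (by omega)] at h3
          exact h3.symm
        · rw [if_neg hc]
          rw [Nat.mod_eq_sub_mod (by omega), Nat.mod_eq_of_lt (by omega)] at h3
          exact h3.symm
      rwa [List.getD_eq_getElem _ _ h1, List.getD_eq_getElem _ _ h2] at hgd

def ModPer (l : List Char) (d : Nat) : Prop :=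
  ∀ i, i < l.length → l.getD i ' ' = l.getD (i % d) ' '

theorem modPer_iff_rotFix {l : List Char} {d : Nat} (hdvd : d ∣ l.length) (hd : 0 < d) :
    ModPer l d ↔ RotFix l d := by
  constructor
  · intro hm i hi
    have hn : 0 < l.length := by omega
    have hj : (i + d) % l.length < l.length := Nat.mod_lt _ hn
    rw [hm _ hj, hm i hi, Nat.mod_mod_of_dvd _ hdvd, Nat.add_mod_right]
  · intro hf i
    induction i using Nat.strong_induction_on with
    | _ i ih =>
      intro hi
      by_cases h : i < d
      · rw [Nat.mod_eq_of_lt h]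
      · have h1 := hf (i - d) (by omega)
        rw [show i - d + d = i from by omega, Nat.mod_eq_of_lt hi] at h1
        rw [← h1, Nat.mod_eq_sub_mod (show i ≥ d from by omega)]
        exact ih (i - d) (by omega) (by omega)

theorem pieces_iff_modPer {l : List Char} {d : Nat} (hdvd : d ∣ l.length) (hd : 0 < d) :
    (∀ j, j < l.length / d → (l.drop (d * j)).take d = l.take d) ↔ ModPer l d := by
  obtain ⟨q, hq⟩ := hdvd
  have hq' : l.length / d = q := by rw [hq, Nat.mul_div_cancel_left _ hd]
  rw [hq']
  constructor
  · intro h i hi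
    have hjq : i / d < q := by
      rw [Nat.div_lt_iff_lt_mul hd, Nat.mul_comm q d, ← hq]; exact hi
    have hmul : d * (i / d) + d ≤ l.length := by
      rw [hq]; calc d * (i / d) + d = d * (i / d + 1) := by ring
        _ ≤ d * q := by exact Nat.mul_le_mul_left d (by omega)
    have ht : i % d < d := Nat.mod_lt _ hd
    have hlen1 : ((l.drop (d * (i / d))).take d).length = d := by simp; omega
    have hgd : ((l.drop (d * (i / d))).take d).getD (i % d) ' ' = (l.take d).getD (i % d) ' ' := by
      rw [h _ hjq]
    rw [List.getD_eq_getElem _ _ (by omega), List.getD_eq_getElem _ _ (by simp; omega),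
      List.getElem_take, List.getElem_take, List.getElem_drop] at hgd
    rw [List.getD_eq_getElem _ _ hi, List.getD_eq_getElem _ _ (by omega)]
    have hidx : d * (i / d) + i % d = i := Nat.div_add_mod i d
    simp only [hidx] at hgd
    exact hgd
  · intro hm j hj
    have hjd : d * j + d ≤ l.length := by
      rw [hq]
      calc d * j + d = d * (j + 1) := by ring
        _ ≤ d * q := Nat.mul_le_mul_left d (by omega)
    apply List.ext_getElem
    · simp; omega
    · intro t h1 h2
      have htd : t < d := by have h2x := h2; simp at h2x; omega
      have hlt : d * j + t < l.length := by omega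
      rw [List.getElem_take, List.getElem_take, List.getElem_drop]
      have h3 := hm (d * j + t) hlt
      rw [Nat.mul_add_mod, Nat.mod_eq_of_lt htd] at h3
      rwa [List.getD_eq_getElem _ _ hlt, List.getD_eq_getElem _ _ (by omega)] at h3

-- the pieces list A builds for a given size, as a map over chunk indices
theorem piecesCompute (l : List Char) (size : Nat) (hs : 0 < size) (hdvd : size ∣ l.length) :
    (PySem.List.pyRange 0 (l.length : Int) (size : Int)).foldl
        (fun acc c => acc ++ [PySem.List.slice l (some c) (some (c + (size : Int)))]) []
      = (List.range (l.length / size)).map (fun k => (l.drop (size * k)).take size) := by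
  rw [PySem.List.foldl_append_singleton_eq_map, List.nil_append,
    PySem.List.pyRange_of_pos 0 _ (by exact_mod_cast hs), List.map_map]
  obtain ⟨q, hq⟩ := hdvd
  have hcnt : ((l.length : Int) - 0 + (size : Int) - 1) / (size : Int) = ((l.length + size - 1) / size : Nat) := by
    rw [sub_zero, show ((l.length : Int) + (size : Int) - 1) = (((l.length + size - 1 : Nat)) : Int) from by omega]
    exact_mod_cast (Int.natCast_ediv _ _).symm
  have hcnt2 : (l.length + size - 1) / size = l.length / size := by
    rw [hq, Nat.mul_div_cancel_left _ hs]
    rw [show size * q + size - 1 = size * q + (size - 1) from by omega,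
      Nat.mul_add_div hs, Nat.div_eq_of_lt (by omega), Nat.add_zero]
  by_cases hn0 : 0 < l.length
  · rw [if_pos (by exact_mod_cast hn0), hcnt, hcnt2, Int.toNat_natCast]
    apply List.map_congr_left
    intro k _
    show PySem.List.slice l (some (0 + (size : Int) * (k : Int)))
        (some (0 + (size : Int) * (k : Int) + (size : Int))) = _
    rw [zero_add, show ((size : Int) * (k : Int)) = ((size * k : Nat) : Int) from by push_cast; ring]
    exact PySem.List.slice_natCast_add l (size * k) size
  · have hl0 : l.length = 0 := by omega
    rw [hl0]
    simp

theorem checkA_some {num : Int} {ps : List (List Char)} {p0 : List Char}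
    (h : PySem.List.pyGet? ps 0 = some p0) :
    checkA num ps = if (PySem.List.count ps p0 : Int) = num then num else 1 := by
  unfold checkA
  rw [h]

-- checkA on that pieces list
theorem checkCompute (l : List Char) (size : Nat) (hs : 0 < size) (hdvd : size ∣ l.length)
    (hn : 0 < l.length) :
    (checkA ((((List.range (l.length / size)).map (fun k => (l.drop (size * k)).take size)).length : Nat) : Int)
        ((List.range (l.length / size)).map (fun k => (l.drop (size * k)).take size)))
      = if (∀ j, j < l.length / size → (l.drop (size * j)).take size = l.take size)
          then ((l.length / size : Nat) : Int) else 1 := by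
  have hszn : size ≤ l.length := Nat.le_of_dvd hn hdvd
  have hqpos : 0 < l.length / size := Nat.div_pos hszn hs
  have hp0 : PySem.List.pyGet?
      ((List.range (l.length / size)).map (fun k => (l.drop (size * k)).take size)) 0
      = some (l.take size) := by
    obtain ⟨q', hq'⟩ : ∃ q', l.length / size = q' + 1 := ⟨l.length / size - 1, by omega⟩
    rw [hq', List.range_succ_eq_map]
    simp [PySem.List.pyGet?, PySem.List.pyIdx?]
  rw [checkA_some hp0]
  have hcnt : (((PySem.List.count
        ((List.range (l.length / size)).map (fun k => (l.drop (size * k)).take size))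
        (l.take size)) : Nat) : Int)
        = ((((List.range (l.length / size)).map (fun k => (l.drop (size * k)).take size)).length : Nat) : Int)
      ↔ (∀ j, j < l.length / size → (l.drop (size * j)).take size = l.take size) := by
    rw [Nat.cast_inj, PySem.List.count_eq, List.count_eq_length]
    constructor
    · intro h j hj
      exact (h _ (List.mem_map_of_mem (List.mem_range.2 hj))).symm
    · intro h b hb
      obtain ⟨j, hj, rfl⟩ := List.mem_map.1 hb
      rw [h j (List.mem_range.1 hj)]
  by_cases hcond : ∀ j, j < l.length / size → (l.drop (size * j)).take size = l.take size
  · rw [if_pos (hcnt.mpr hcond), if_pos hcond]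
    simp
  · rw [if_neg (fun hh => hcond (hcnt.mp hh)), if_neg hcond]

theorem loop_eq (l : List Char) (d : Nat) (h0 : 0 < d) (hfix : RotFix l d)
    (hdvd : d ∣ l.length) (hdn : d ≤ l.length) (hn : 0 < l.length)
    (hmin : ∀ m, 0 < m → m < d → ¬ RotFix l m) :
    ∀ size, 0 < size → size ≤ d → solutionLoop l size = ((l.length / d : Nat) : Int) := by
  suffices h : ∀ k size, 0 < size → size ≤ d → d - size = k →
      solutionLoop l size = ((l.length / d : Nat) : Int) by
    exact fun size h1 h2 => h _ size h1 h2 rfl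
  intro k
  induction k with
  | zero =>
    intro size h1 h2 h3
    have hsd : size = d := by omega
    subst hsd
    by_cases hlt : size < l.length
    · have hmod : l.length % size = 0 := Nat.dvd_iff_mod_eq_zero.mp hdvd
      rw [solutionLoop, if_pos hlt, if_pos hmod]
      simp only [piecesCompute l size h1 hdvd, checkCompute l size h1 hdvd hn]
      have hcond : ∀ j, j < l.length / size → (l.drop (size * j)).take size = l.take size :=
        (pieces_iff_modPer hdvd h1).mpr ((modPer_iff_rotFix hdvd h1).mpr hfix)
      rw [if_pos hcond]
      have hc := Nat.div_mul_cancel hdvd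
      have hq2 : 2 ≤ l.length / size := by
        rcases Nat.lt_or_ge (l.length / size) 2 with hle | hge
        · exfalso
          have h4 : l.length / size * size ≤ 1 * size := Nat.mul_le_mul_right size (by omega)
          omega
        · exact hge
      rw [if_pos (by exact_mod_cast (show l.length / size ≠ 1 from by omega))]
    · have hsn : size = l.length := by omega
      rw [solutionLoop, if_neg hlt, hsn, Nat.div_self hn]
      simp
  | succ k ih =>
    intro size h1 h2 h3
    have hlt : size < d := by omega
    have hsln : size < l.length := by omega
    have hstep : solutionLoop l size = solutionLoop l (size + 1) := by
      rw [solutionLoop, if_pos hsln]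
      by_cases hmod : l.length % size = 0
      · have hdvd2 : size ∣ l.length := Nat.dvd_of_mod_eq_zero hmod
        rw [if_pos hmod]
        simp only [piecesCompute l size h1 hdvd2,
          checkCompute l size h1 hdvd2 hn]
        have hcond : ¬ (∀ j, j < l.length / size → (l.drop (size * j)).take size = l.take size) := by
          intro hc
          exact hmin size h1 hlt
            ((modPer_iff_rotFix hdvd2 h1).mp ((pieces_iff_modPer hdvd2 h1).mp hc))
        rw [if_neg hcond]
        simp
      · rw [if_neg hmod]
    rw [hstep]
    exact ih (size + 1) (by omega) (by omega) (by omega)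

theorem prefix_drop_iff_rot (l : List Char) (p : Nat) (hp : p ≤ l.length) :
    (l <+: (l ++ l).drop p) ↔ (l.drop p ++ l.take p = l) := by
  rw [List.drop_append_of_le_length hp, List.prefix_iff_eq_take, List.take_append,
    List.take_of_length_le (by simp), show l.length - (l.drop p).length = p from by simp; omega]
  exact eq_comm

theorem alt_eq (s : String) (hne : s.toList ≠ []) (d : Nat) (h0 : 0 < d)
    (hfix : RotFix s.toList d) (hdn : d ≤ s.toList.length)
    (hmin : ∀ m, 0 < m → m < d → ¬ RotFix s.toList m) :
    solution_alt s = ((s.toList.length / d : Nat) : Int) := by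
  unfold solution_alt
  rw [if_neg (fun h => hne (String.toList_eq_nil_iff.mpr h)), PySem.Str.findFrom_eq,
    PySem.Str.len_eq, String.toList_append]
  have hn : 0 < s.toList.length := by
    cases h : s.toList with
    | nil => exact absurd h hne
    | cons a t => simp
  rw [show (1 : Int) = ((1 : Nat) : Int) from by simp]
  have hk : (1 : Nat) ≤ (s.toList ++ s.toList).length := by rw [List.length_append]; omega
  have hinf : s.toList <:+: (s.toList ++ s.toList).drop 1 := by
    have h2 : ((s.toList ++ s.toList).drop 1).drop (s.toList.length - 1) = s.toList := by
      rw [List.drop_drop, show 1 + (s.toList.length - 1) = s.toList.length from by omega]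
      exact List.drop_left
    obtain ⟨u, hu⟩ := List.drop_suffix (s.toList.length - 1) ((s.toList ++ s.toList).drop 1)
    rw [h2] at hu
    exact ⟨u, [], by rw [List.append_nil]; exact hu⟩
  have hne1 : PySem.Chars.findFrom (s.toList ++ s.toList) s.toList (((1 : Nat)) : Int) ≠ -1 :=
    fun h => ((PySem.Chars.findFrom_natCast_eq_neg_one_iff _ _ 1 hk).mp h) hinf
  obtain ⟨hge, hpre, hminF⟩ := PySem.Chars.findFrom_natCast_spec (s.toList ++ s.toList) s.toList 1 hk hne1
  set r := PySem.Chars.findFrom (s.toList ++ s.toList) s.toList (((1 : Nat)) : Int) with hr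
  have hrn : r.toNat ≤ s.toList.length := by
    have h3 := hpre.length_le
    rw [List.length_drop, List.length_append] at h3
    omega
  have hrpos : 0 < r.toNat := by omega
  have hfixr : RotFix s.toList r.toNat :=
    (rot_eq_iff_rotFix hrn).mp ((prefix_drop_iff_rot s.toList r.toNat hrn).mp hpre)
  have hrd : r.toNat = d := by
    apply Nat.le_antisymm
    · by_contra hgt
      push Not at hgt
      exact hminF d h0 hgt
        ((prefix_drop_iff_rot s.toList d hdn).mpr ((rot_eq_iff_rotFix hdn).mpr hfix))
    · by_contra hgt
      push Not at hgt
      exact hmin r.toNat hrpos hgt hfixr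
  rw [show r = ((d : Nat) : Int) from by omega]
  exact PySem.Int.floordiv_natCast _ _

-- ===== VERDICT (by name: the statement is the Claim_ definition above) =====
theorem solution_spec : Claim_equal_solution := by
  intro s _
  unfold Spec_solution
  by_cases hs : s = ""
  · subst hs
    show solutionLoop "".toList 1 = _
    rw [solutionLoop]
    simp [solution_alt]
  · have hne : s.toList ≠ [] := fun h => hs (String.toList_eq_nil_iff.mp h)
    have hn : 0 < s.toList.length := by
      cases h : s.toList with
      | nil => exact absurd h hne
      | cons a t => simp
    haveI : DecidablePred (fun p => 0 < p ∧ RotFix s.toList p) := fun p => by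
      unfold RotFix; infer_instance
    have hex : ∃ p, 0 < p ∧ RotFix s.toList p := ⟨s.toList.length, hn, rotFix_length _⟩
    obtain ⟨hdpos, hdfix⟩ := Nat.find_spec hex
    have hdn : Nat.find hex ≤ s.toList.length := Nat.find_min' hex ⟨hn, rotFix_length _⟩
    have hmin : ∀ m, 0 < m → m < Nat.find hex → ¬ RotFix s.toList m :=
      fun m h1 h2 hf => Nat.find_min hex h2 ⟨h1, hf⟩
    have hdvd : Nat.find hex ∣ s.toList.length := by
      have hmodfix := rotFix_mod hdfix hdpos s.toList.length (rotFix_length _)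
      by_cases hz : s.toList.length % Nat.find hex = 0
      · exact Nat.dvd_of_mod_eq_zero hz
      · exact absurd hmodfix (hmin _ (Nat.pos_of_ne_zero hz) (Nat.mod_lt _ hdpos))
    rw [show solution s = solutionLoop s.toList 1 from rfl,
      loop_eq s.toList (Nat.find hex) hdpos hdfix hdvd hdn hn hmin 1 one_pos hdpos,
      alt_eq s hne (Nat.find hex) hdpos hdfix hdn hmin]
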